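-- pv_equiv track=rewrite | github.com/frenzymadness/aoc | 2020/18/solution1.py | parse_par
-- ===== SOURCE A (Python) =====
-- def parse_par(exp):
--     result = []
--     stack = []
--     for i, c in enumerate(exp):
--         if c == '(':
--             stack.append(i)
--         elif c == ')' and stack:
--             start = stack.pop()
--             result.append((len(stack), exp[start + 1: i]))
--     return result
-- ===== SOURCE B (Python) =====
-- def parse_par(exp):
--     result = []
--
--     def parse(i, depth):
--         # Scan exp from index i as the inside of `depth` open parens; recurse on '('.
--         # Return (inner_text, index_after_closing_paren), or None if the string
--         # ends before this level's ')' (unmatched '(' emits nothing).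
--         inner = []
--         while i < len(exp):
--             c = exp[i]
--             i += 1
--             if c == '(':
--                 m = parse(i, depth + 1)
--                 if m is None:
--                     return None
--                 body, i = m
--                 result.append((depth, body))
--                 inner.append('(' + body + ')')
--             elif c == ')' and depth > 0:
--                 return ''.join(inner), i
--             else:
--                 inner.append(c)
--         return None
--
--     parse(0, 0)
--     return result
-- ===== Notes on version B (the rewrite author's own statement) =====
-- stated objective: alternative
-- what changed: Replaced the iterative index-stack-and-slice scan with a recursive-descent parser that recurses on '(' and rebuilds each level's inner text by concatenation, appending pairs in post-order.
import Mathlib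
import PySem

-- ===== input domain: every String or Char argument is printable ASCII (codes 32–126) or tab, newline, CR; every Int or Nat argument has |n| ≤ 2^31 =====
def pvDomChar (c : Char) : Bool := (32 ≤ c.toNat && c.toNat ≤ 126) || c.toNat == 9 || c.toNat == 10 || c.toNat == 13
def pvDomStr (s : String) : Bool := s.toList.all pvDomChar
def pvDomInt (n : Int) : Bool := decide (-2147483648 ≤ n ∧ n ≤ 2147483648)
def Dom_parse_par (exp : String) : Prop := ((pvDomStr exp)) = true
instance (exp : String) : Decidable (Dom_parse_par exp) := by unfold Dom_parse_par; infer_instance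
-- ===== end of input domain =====

-- B replaces A's index stack + slicing with a recursive-descent parser that rebuilds each
-- level's text by concatenation (alternative decomposition, same asymptotic cost).

-- ===== PORT A =====
-- A-side helper: the body of A's for-loop (one step of the fold over enumerate(exp)).
def pvAstep (full : List Char) (st : List (Int × String) × List Int) (ic : Int × Char) :
    List (Int × String) × List Int :=
  if ic.2 = '(' then (st.1, st.2 ++ [ic.1])
  else if ic.2 = ')' ∧ st.2 ≠ [] then
    (st.1 ++ [(((st.2.length : Int) - 1),
       String.ofList (PySem.List.slice full (some (st.2.getLastD 0 + 1)) (some ic.1)))],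
     st.2.dropLast)
  else st

def parse_par (exp : String) : List (Int × String) :=
  ((PySem.List.enumerate exp.toList 0).foldl (pvAstep exp.toList) ([], [])).1

-- ===== PORT B =====
-- parse(chars, depth): returns (pairs, m); m = none when the string ended before this
-- level's ')' (unmatched '('), else some (inner text of this level, chars after the ')').
-- The subtype bound on `rest` only records that the ')' was consumed (for termination).
def altParse : Int → (cs : List Char) →
    (List (Int × String)) × Option (List Char × {rest : List Char // rest.length < cs.length})
  | _, [] => ([], none)
  | depth, c :: tail =>
    if c = '(' then
      match altParse (depth + 1) tail with
      | (sub, none) => (sub, none)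
      | (sub, some (body, ⟨after, hafter⟩)) =>
        match altParse depth after with
        | (pairs, none) => (sub ++ [(depth, String.ofList body)] ++ pairs, none)
        | (pairs, some (inner2, ⟨rest, hrest⟩)) =>
          (sub ++ [(depth, String.ofList body)] ++ pairs,
           some ('(' :: (body ++ ')' :: inner2), ⟨rest, by simp; omega⟩))
    else if c = ')' ∧ depth > 0 then
      ([], some ([], ⟨tail, by simp⟩))
    else
      match altParse depth tail with
      | (pairs, none) => (pairs, none)
      | (pairs, some (inner2, ⟨rest, h⟩)) => (pairs, some (c :: inner2, ⟨rest, by simp; omega⟩))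
  termination_by _ cs => cs.length
  decreasing_by all_goals simp_wf <;> omega

def parse_par_alt (exp : String) : List (Int × String) :=
  (altParse 0 exp.toList).1

-- ===== PRECONDITION & SPEC =====
def Spec_parse_par (exp : String) (out : List (Int × String)) : Prop := out = parse_par_alt exp
instance (exp : String) (out : List (Int × String)) : Decidable (Spec_parse_par exp out) := by unfold Spec_parse_par; infer_instance

-- ===== CLAIM (what is proved, stated in full; the proofs are below) =====
def Claim_equal_parse_par : Prop := ∀ (exp : String), Dom_parse_par exp → Spec_parse_par exp (parse_par exp)

-- ===== LEMMAS AND PROOFS =====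

-- At depth ≤ 0 altParse never reports a closing ')' (stray ')' at top level is skipped).
lemma altParse_zero :
    ∀ n (cs : List Char), cs.length ≤ n → ∀ (d : Int), d ≤ 0 → (altParse d cs).2 = none := by
  intro n
  induction n with
  | zero =>
    intro cs h d hd
    match cs with
    | [] => rw [altParse.eq_def]
    | c :: tail => simp at h
  | succ n ih =>
    intro cs h d hd
    match cs with
    | [] => rw [altParse.eq_def]
    | c :: tail =>
      rw [altParse.eq_def]
      dsimp only
      simp only [List.length_cons] at h
      split
      · rcases h1 : altParse (d+1) tail with ⟨sub, m⟩
        match m with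
        | none => simp [h1]
        | some (body, ⟨after, hafter⟩) =>
          simp only [h1]
          rcases h2 : altParse d after with ⟨pairs, m2⟩
          have : m2 = none := by
            have := ih after (by omega) d hd
            rw [h2] at this; exact this
          subst this
          simp
      · split
        · rename_i hcond; exfalso; omega
        · rcases h1 : altParse d tail with ⟨pairs, m⟩
          have : m = none := by have := ih tail (by omega) d hd; rw [h1] at this; exact this
          subst this; simp [h1]


-- If altParse returns some(body, rest), the input was body ++ ')' :: rest.
lemma altParse_decomp :
    ∀ n (cs : List Char), cs.length ≤ n → ∀ (d : Int) body rest h,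
      (altParse d cs).2 = some (body, ⟨rest, h⟩) → cs = body ++ ')' :: rest := by
  intro n
  induction n with
  | zero =>
    intro cs h d body rest hr hs
    match cs with
    | [] => rw [altParse.eq_def] at hs; simp at hs
    | c :: tail => simp at h
  | succ n ih =>
    intro cs h d body rest hr hs
    match cs with
    | [] => rw [altParse.eq_def] at hs; simp at hs
    | c :: tail =>
      rw [altParse.eq_def] at hs
      dsimp only at hs
      simp only [List.length_cons] at h
      split at hs
      · rename_i hc
        rcases h1 : altParse (d+1) tail with ⟨sub, m⟩
        rw [h1] at hs
        match m with
        | none => simp at hs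
        | some (body1, ⟨after, hafter⟩) =>
          have e1 : tail = body1 ++ ')' :: after :=
            ih tail (by omega) (d+1) body1 after hafter (by rw [h1])
          dsimp only at hs
          rcases h2 : altParse d after with ⟨pairs, m2⟩
          rw [h2] at hs
          match m2 with
          | none => simp at hs
          | some (inner2, ⟨rest2, hrest2⟩) =>
            have e2 : after = inner2 ++ ')' :: rest2 :=
              ih after (by omega) d inner2 rest2 hrest2 (by rw [h2])
            simp only [Option.some.injEq, Prod.mk.injEq, Subtype.mk.injEq] at hs
            obtain ⟨hb, hrr⟩ := hs
            subst hc; subst hb; subst hrr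
            simp [e1, e2]
      · split at hs
        · rename_i hc
          simp only [Option.some.injEq, Prod.mk.injEq, Subtype.mk.injEq] at hs
          obtain ⟨hb, hrr⟩ := hs
          subst hb; subst hrr
          simp [hc.1]
        · rcases h1 : altParse d tail with ⟨pairs, m⟩
          rw [h1] at hs
          match m with
          | none => simp at hs
          | some (inner2, ⟨rest2, h2⟩) =>
            have e1 : tail = inner2 ++ ')' :: rest2 :=
              ih tail (by omega) d inner2 rest2 h2 (by rw [h1])
            simp only [Option.some.injEq, Prod.mk.injEq, Subtype.mk.injEq] at hs
            obtain ⟨hb, hrr⟩ := hs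
            subst hb; subst hrr
            simp [e1]

-- Main invariant: A's fold from (res, s) over the suffix of exp at index j behaves as
-- one altParse call at depth |s|: same emitted pairs, and on return the popped slice
-- equals the recursively rebuilt inner text.
lemma pv_main (full : List Char) :
    ∀ n (cs : List Char), cs.length ≤ n → ∀ (j : Nat), full.drop j = cs →
    ∀ (res : List (Int × String)) (s : List Int) (d : Int), d = (s.length : Int) →
      ((altParse d cs).2 = none →
        ((PySem.List.enumerate cs (j : Int)).foldl (pvAstep full) (res, s)).1
          = res ++ (altParse d cs).1) ∧
      (∀ body rest h, (altParse d cs).2 = some (body, ⟨rest, h⟩) → s ≠ [] →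
        (PySem.List.enumerate cs (j : Int)).foldl (pvAstep full) (res, s)
          = (PySem.List.enumerate rest ((j : Int) + body.length + 1)).foldl (pvAstep full)
              (res ++ (altParse d cs).1
                 ++ [((d - 1),
                      String.ofList (PySem.List.slice full (some (s.getLastD 0 + 1))
                                   (some ((j : Int) + body.length))))],
               s.dropLast)) := by
  intro n
  induction n with
  | zero =>
    intro cs h j hdrop res s d hd
    match cs with
    | [] =>
      constructor
      · intro _; rw [altParse.eq_def]; simp [PySem.List.enumerate]
      · intro body rest hr hs; rw [altParse.eq_def] at hs; simp at hs
    | c :: tail => simp at h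
  | succ n ih =>
    intro cs h j hdrop res s d hd
    match cs with
    | [] =>
      constructor
      · intro _; rw [altParse.eq_def]; simp [PySem.List.enumerate]
      · intro body rest hr hs; rw [altParse.eq_def] at hs; simp at hs
    | c :: tail =>
      simp only [List.length_cons] at h
      have hdrop1 : full.drop (j+1) = tail := by
        rw [← List.drop_drop, hdrop]; rfl
      have henum : PySem.List.enumerate (c :: tail) (j : Int)
          = ((j : Int), c) :: PySem.List.enumerate tail (((j+1 : Nat)) : Int) := by
        rw [PySem.List.enumerate_cons]; push_cast; ring_nf
      by_cases hc : c = '('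
      · -- push branch
        have hstep : pvAstep full (res, s) ((j : Int), c) = (res, s ++ [(j : Int)]) := by
          simp [pvAstep, hc]
        rcases h1 : altParse (d + 1) tail with ⟨sub, m⟩
        have hd1 : d + 1 = ((s ++ [(j : Int)]).length : Int) := by simp [hd]
        have IH1 := ih tail (by omega) (j+1) hdrop1 res (s ++ [(j : Int)]) (d+1) hd1
        match m with
        | none =>
          have hR : altParse d (c :: tail) = (sub, none) := by
            rw [altParse.eq_def]; dsimp only; rw [if_pos hc, h1]
          constructor
          · intro _
            rw [hR, henum, List.foldl_cons, hstep]
            simpa [h1] using IH1.1 (by rw [h1])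
          · intro body rest hr hs
            rw [hR] at hs; simp at hs
        | some (body1, ⟨after, hafter⟩) =>
          -- the group closes: IH on the inside, then on the continuation
          have hdec : tail = body1 ++ ')' :: after :=
            altParse_decomp tail.length tail (le_refl _) (d+1) body1 after hafter (by rw [h1])
          have hdropA : full.drop (j + body1.length + 2) = after := by
            have h2 : full.drop (j+1) = body1 ++ ')' :: after := by rw [hdrop1, hdec]
            have : full.drop (j + body1.length + 2) = (full.drop (j+1)).drop (body1.length + 1) := by
              rw [List.drop_drop]; ring_nf
            rw [this, h2]
            rw [show body1.length + 1 = (body1 ++ [')']).length by simp]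
            rw [show body1 ++ ')' :: after = (body1 ++ [')']) ++ after by simp]
            exact List.drop_left
          have hslice : PySem.List.slice full (some ((j : Int) + 1)) (some (((j+1 : Nat) : Int) + (body1.length : Int)))
              = body1 := by
            have : ((j : Int) + 1) = (((j+1 : Nat)) : Int) := by push_cast; ring
            rw [this, PySem.List.slice_natCast_add, hdrop1, hdec]
            simp
          -- apply the inner IH (some case) with stack s ++ [j]
          have IHin := IH1.2 body1 after hafter (by rw [h1]) (by simp)
          rw [List.getLastD_concat, List.dropLast_concat, h1, hslice] at IHin
          have hj2 : ((j + 1 : Nat) : Int) + (body1.length : Int) + 1 = ((j + body1.length + 2 : Nat) : Int) := by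
            push_cast; ring
          rw [hj2] at IHin
          have hd1' : (d + 1 - 1) = d := by ring
          rw [hd1'] at IHin
          rcases h2 : altParse d after with ⟨pairs, m2⟩
          have IH2 := ih after (by omega) (j + body1.length + 2) hdropA
            (res ++ sub ++ [(d, String.ofList body1)]) s d hd
          match m2 with
          | none =>
            have hR : altParse d (c :: tail) = (sub ++ [(d, String.ofList body1)] ++ pairs, none) := by
              rw [altParse.eq_def]; dsimp only; rw [if_pos hc, h1]; dsimp only; rw [h2]
            constructor
            · intro _
              rw [hR, henum, List.foldl_cons, hstep, IHin]
              have := IH2.1 (by rw [h2])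
              rw [h2] at this
              rw [this]
              simp
            · intro body rest hr hs
              rw [hR] at hs; simp at hs
          | some (inner2, ⟨rest2, hrest2⟩) =>
            have hR : altParse d (c :: tail)
                = (sub ++ [(d, String.ofList body1)] ++ pairs,
                   some ('(' :: (body1 ++ ')' :: inner2), ⟨rest2, by
                     have := hrest2; have := hafter; simp; omega⟩)) := by
              rw [altParse.eq_def]; dsimp only; rw [if_pos hc, h1]; dsimp only; rw [h2]
            constructor
            · intro hnone; rw [hR] at hnone; simp at hnone
            · intro body rest hr hs hne
              rw [hR] at hs
              simp only [Option.some.injEq, Prod.mk.injEq, Subtype.mk.injEq] at hs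
              obtain ⟨hb, hrr⟩ := hs
              subst hb; subst hrr
              have IH2s := IH2.2 inner2 rest2 hrest2 (by rw [h2]) hne
              rw [h2] at IH2s
              rw [hR, henum, List.foldl_cons, hstep, IHin, IH2s]
              have hidx : ((j + body1.length + 2 : Nat) : Int) + (inner2.length : Int) + 1
                  = (j : Int) + (('(' :: (body1 ++ ')' :: inner2)).length : Int) + 1 := by
                simp; push_cast; ring
              have hbnd : ((j + body1.length + 2 : Nat) : Int) + (inner2.length : Int)
                  = (j : Int) + (('(' :: (body1 ++ ')' :: inner2)).length : Int) := by
                simp; push_cast; ring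
              rw [hidx, hbnd]
              simp [List.append_assoc]
      · -- c is not '('
        by_cases hcp : c = ')' ∧ 0 < d
        · have hne : s ≠ [] := by
            intro hnil; rw [hnil] at hd; simp at hd; omega
          have hR : altParse d (c :: tail) = ([], some ([], ⟨tail, by simp⟩)) := by
            rw [altParse.eq_def]; dsimp only; rw [if_neg hc, if_pos hcp]
          have hstep : pvAstep full (res, s) ((j : Int), c)
              = (res ++ [(((s.length : Int) - 1),
                   String.ofList (PySem.List.slice full (some (s.getLastD 0 + 1)) (some (j : Int)))) ],
                 s.dropLast) := by
            simp [pvAstep, hc, hcp.1, hne]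
          constructor
          · intro hnone; rw [hR] at hnone; simp at hnone
          · intro body rest hr hs _
            rw [hR] at hs
            simp only [Option.some.injEq, Prod.mk.injEq, Subtype.mk.injEq] at hs
            obtain ⟨hb, hrr⟩ := hs
            subst hb; subst hrr
            rw [hR, henum, List.foldl_cons, hstep]
            have hidx : ((j : Int) + (([] : List Char).length : Int) + 1) = (((j + 1 : Nat)) : Int) := by
              simp
            have hbnd : ((j : Int) + (([] : List Char).length : Int)) = (j : Int) := by simp
            rw [hidx, hbnd, hd]
            simp
        · have hnost : ¬(c = ')' ∧ s ≠ []) := by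
            rintro ⟨h', h''⟩
            exact hcp ⟨h', by rw [hd]; exact_mod_cast Nat.cast_pos.mpr (List.length_pos_iff.mpr h'')⟩
          have hstep : pvAstep full (res, s) ((j : Int), c) = (res, s) := by
            simp only [pvAstep]
            rw [if_neg (by simpa using hc), if_neg hnost]
          rcases h1 : altParse d tail with ⟨pairs, m⟩
          have IH1 := ih tail (by omega) (j+1) hdrop1 res s d hd
          match m with
          | none =>
            have hR : altParse d (c :: tail) = (pairs, none) := by
              rw [altParse.eq_def]; dsimp only; rw [if_neg hc, if_neg hcp, h1]
            constructor
            · intro _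
              rw [hR, henum, List.foldl_cons, hstep]
              have := IH1.1 (by rw [h1])
              rw [h1] at this
              exact this
            · intro body rest hr hs
              rw [hR] at hs; simp at hs
          | some (inner2, ⟨rest2, h2⟩) =>
            have hR : altParse d (c :: tail)
                = (pairs, some (c :: inner2, ⟨rest2, by have := h2; simp; omega⟩)) := by
              rw [altParse.eq_def]; dsimp only; rw [if_neg hc, if_neg hcp, h1]
            constructor
            · intro hnone; rw [hR] at hnone; simp at hnone
            · intro body rest hr hs hne
              rw [hR] at hs
              simp only [Option.some.injEq, Prod.mk.injEq, Subtype.mk.injEq] at hs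
              obtain ⟨hb, hrr⟩ := hs
              subst hb; subst hrr
              have IH1s := IH1.2 inner2 rest2 h2 (by rw [h1]) hne
              rw [h1] at IH1s
              rw [hR, henum, List.foldl_cons, hstep, IH1s]
              have hidx : (((j + 1 : Nat)) : Int) + (inner2.length : Int) + 1
                  = (j : Int) + ((c :: inner2).length : Int) + 1 := by
                simp; push_cast; ring
              have hbnd : (((j + 1 : Nat)) : Int) + (inner2.length : Int)
                  = (j : Int) + ((c :: inner2).length : Int) := by
                simp; push_cast; ring
              rw [hidx, hbnd]



-- ===== VERDICT (by name: the statement is the Claim_ definition above) =====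
theorem parse_par_spec : Claim_equal_parse_par := by
  intro exp _
  unfold Spec_parse_par parse_par parse_par_alt
  have h := (pv_main exp.toList exp.toList.length exp.toList (le_refl _) 0 rfl [] [] 0 (by simp)).1
  have hz := altParse_zero exp.toList.length exp.toList (le_refl _) 0 (le_refl _)
  simpa using h hz
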